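-- pv_equiv track=rewrite | github.com/Sabibou/Cours_L2_Info | Modeliser Resolution/Exo_SAT.py | iter_all_assignments
-- ===== SOURCE A (Python) =====
-- def iter_all_assignments(d):
--     """An iterator to generate all the possible assignments of a dictionary d.
--     NB: the call returns an iterator of assignments, not the assignments."""
--     keys = list(d.keys())
--     n = len(keys)
--
--     def binIter():
--         for i in range(2**n):
--             l = []
--             for j in range(n):
--                 l.append((i >> j) % 2)
--             yield l
--
--     for it in binIter():
--         yield {keys[i]: bool(it[i]) for i in range(n)}
-- ===== SOURCE B (Python) =====
-- def iter_all_assignments(d):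
--     """An iterator to generate all the possible assignments of a dictionary d.
--     NB: the call returns an iterator of assignments, not the assignments."""
--     keys = list(d.keys())
--
--     # Cartesian product of (False, True) with itself len(keys) times, built by
--     # iterative doubling; the coordinate added last varies fastest.
--     rows = [()]
--     for _ in keys:
--         rows = [row + (x,) for row in rows for x in (False, True)]
--
--     for t in rows:
--         # A varies keys[0] fastest; in t the LAST coordinate varies fastest,
--         # so pair keys with the reversed tuple.
--         yield dict(zip(keys, reversed(t)))
-- ===== Notes on version B (the rewrite author's own statement) =====
-- stated objective: alternative
-- what changed: Replaces the bit-arithmetic enumeration ((i >> j) % 2 over range(2**n)) with an iterative-doubling Cartesian product of (False, True), pairing each product tuple reversed against the keys to keep the exact emission order.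
import Mathlib
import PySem

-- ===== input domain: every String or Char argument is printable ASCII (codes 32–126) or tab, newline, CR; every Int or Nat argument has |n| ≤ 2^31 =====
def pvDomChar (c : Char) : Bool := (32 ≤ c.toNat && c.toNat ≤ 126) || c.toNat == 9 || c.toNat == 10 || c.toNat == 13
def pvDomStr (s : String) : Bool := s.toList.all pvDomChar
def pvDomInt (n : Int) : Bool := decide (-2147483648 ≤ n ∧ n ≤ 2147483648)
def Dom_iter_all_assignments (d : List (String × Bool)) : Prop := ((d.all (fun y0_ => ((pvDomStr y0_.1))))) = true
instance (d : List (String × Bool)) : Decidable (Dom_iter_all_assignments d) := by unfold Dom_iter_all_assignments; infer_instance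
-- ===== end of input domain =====

-- B replaces A's bit-arithmetic enumeration ((i >> j) % 2 over range(2**n)) by a recursive
-- Cartesian product of (False, True) zipped against the keys in reverse pairing (alternative, same cost).
-- Both A and B are generators in Python; the list of all yielded assignments is what is modelled here.

-- ===== PORT A =====
-- keys[i] and it[i] are always in range (i ∈ range(n)), so pyGetD with a dummy default is exact;
-- j ≥ 0 (it comes from range(n)), so Python's 'i >> j' is exactly '>>> j.toNat'.
-- body of binIter's inner loop: l = []; for j in range(n): l.append((i >> j) % 2)
def pvRowA (n : Nat) (i : Int) : List Int :=
  (PySem.List.pyRange 0 (n : Int) 1).foldl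
    (fun l j => l ++ [PySem.Int.mod (i >>> j.toNat) 2]) []

-- the dict comprehension {keys[i]: bool(it[i]) for i in range(n)}
def pvDictA (ks : List String) (it : List Int) : PySem.Dict String Bool :=
  (PySem.List.pyRange 0 (ks.length : Int) 1).foldl
    (fun dd i =>
      dd.insert (PySem.List.pyGetD ks i "") (PySem.List.pyGetD it i 0 != 0))
    PySem.Dict.empty

def iter_all_assignments (d : List (String × Bool)) : List (List (String × Bool)) :=
  let keys := PySem.Dict.keys (PySem.Dict.ofList d)
  let n := keys.length
  let binIter : List (List Int) :=
    (PySem.List.pyRange 0 ((2 : Int) ^ n) 1).map (fun i => pvRowA n i)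
  binIter.map (fun it => (pvDictA keys it).items)

-- ===== PORT B =====
def iter_all_assignments_alt (d : List (String × Bool)) : List (List (String × Bool)) :=
  let keys := PySem.Dict.keys (PySem.Dict.ofList d)
  let rows := keys.foldl
    (fun rows _ => rows.flatMap (fun row => [false, true].map (fun x => row ++ [x])))
    ([[]] : List (List Bool))
  rows.map (fun t => (PySem.Dict.ofList (keys.zip t.reverse)).items)

-- ===== PRECONDITION & SPEC =====
def Spec_iter_all_assignments (d : List (String × Bool)) (out : List (List (String × Bool))) : Prop := out = iter_all_assignments_alt d
instance (d : List (String × Bool)) (out : List (List (String × Bool))) : Decidable (Spec_iter_all_assignments d out) := by unfold Spec_iter_all_assignments; infer_instance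

-- ===== CLAIM (what is proved, stated in full; the proofs are below) =====
def Claim_equal_iter_all_assignments : Prop := ∀ (d : List (String × Bool)), Dom_iter_all_assignments d → Spec_iter_all_assignments d (iter_all_assignments d)

-- ===== LEMMAS AND PROOFS =====

/-- Proof-side view of B's doubling loop: product of (false, true) with itself n
times, first coordinate varying slowest. -/
def pvProd : Nat → List (List Bool)
  | 0 => [[]]
  | n + 1 => [false, true].flatMap (fun x => (pvProd n).map (fun t => x :: t))

/-- Appending a fastest-varying last coordinate equals prepending a slowest first one. -/
theorem pvProd_succ_append (n : Nat) :
    pvProd (n + 1) = (pvProd n).flatMap (fun row => [false, true].map (fun x => row ++ [x])) := by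
  induction n with
  | zero => rfl
  | succ n ih =>
    show [false, true].flatMap (fun x => (pvProd (n + 1)).map (fun t => x :: t))
        = (pvProd (n + 1)).flatMap (fun row => [false, true].map (fun x => row ++ [x]))
    conv_lhs => rw [ih]
    conv_rhs => rw [show pvProd (n + 1)
      = [false, true].flatMap (fun x => (pvProd n).map (fun t => x :: t)) from rfl]
    simp [List.map_flatMap, List.flatMap_map]

theorem pvRows_foldl {α : Type} (l : List α) (m : Nat) :
    l.foldl (fun rows _ => rows.flatMap (fun row => [false, true].map (fun x => row ++ [x])))
      (pvProd m) = pvProd (m + l.length) := by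
  induction l generalizing m with
  | nil => simp
  | cons a t ih =>
    rw [List.foldl_cons, ← pvProd_succ_append m, ih (m + 1)]
    congr 1
    simp only [List.length_cons]
    omega


/-- The width-`n` bit vector of `k`, lowest bit first: the value A assigns to the keys at step `k`. -/
def pvBits (n k : Nat) : List Bool := (List.range n).map (fun j => decide (k >>> j % 2 = 1))

theorem pvShift_lt {n k : Nat} (h : k < 2 ^ n) : k >>> n = 0 := by
  rw [Nat.shiftRight_eq_div_pow]; exact Nat.div_eq_of_lt h

theorem pvShift_add_high {n k : Nat} (h : k < 2 ^ n) : (2 ^ n + k) >>> n = 1 := by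
  rw [Nat.shiftRight_eq_div_pow, Nat.add_div_left k (Nat.two_pow_pos n), Nat.div_eq_of_lt h]

theorem pvShift_add_low {n k j : Nat} (hj : j < n) :
    (2 ^ n + k) >>> j % 2 = k >>> j % 2 := by
  rw [Nat.shiftRight_eq_div_pow, Nat.shiftRight_eq_div_pow]
  have h1 : 2 ^ n = 2 ^ j * (2 ^ (n - j - 1) * 2) := by
    rw [← pow_succ, ← pow_add]; congr 1; omega
  rw [h1, Nat.mul_add_div (Nat.two_pow_pos j)]
  omega

theorem pvBits_succ (n k : Nat) :
    pvBits (n + 1) k = pvBits n k ++ [decide (k >>> n % 2 = 1)] := by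
  simp [pvBits, List.range_succ]

/-- Main enumeration lemma: counting 0..2^n-1 lowest-bit-first equals
the itertools.product order with each tuple reversed. -/
theorem pvBits_eq_prod (n : Nat) :
    (List.range (2 ^ n)).map (pvBits n) = (pvProd n).map List.reverse := by
  induction n with
  | zero => rfl
  | succ n ih =>
    have hsplit : 2 ^ (n + 1) = 2 ^ n + 2 ^ n := by rw [pow_succ]; omega
    have hprod : pvProd (n + 1)
        = (pvProd n).map (false :: ·) ++ (pvProd n).map (true :: ·) := by
      simp [pvProd]
    rw [hsplit, List.range_add, List.map_append, List.map_map, hprod, List.map_append,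
        List.map_map, List.map_map]
    congr 1
    · have h1 : ∀ k ∈ List.range (2 ^ n), pvBits (n + 1) k = pvBits n k ++ [false] := by
        intro k hk
        rw [List.mem_range] at hk
        rw [pvBits_succ, pvShift_lt hk]
        norm_num
      rw [List.map_congr_left h1,
          show (fun k => pvBits n k ++ [false]) = ((· ++ [false]) ∘ pvBits n) from rfl,
          ← List.map_map, ih, List.map_map]
      simp [Function.comp_def]
    · have h1 : ∀ k ∈ List.range (2 ^ n),
          pvBits (n + 1) (2 ^ n + k) = pvBits n k ++ [true] := by
        intro k hk
        rw [List.mem_range] at hk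
        rw [pvBits_succ, pvShift_add_high hk]
        congr 1
        apply List.map_congr_left
        intro j hj
        rw [List.mem_range] at hj
        rw [pvShift_add_low hj]
      calc (List.range (2 ^ n)).map (pvBits (n + 1) ∘ (2 ^ n + ·))
          = (List.range (2 ^ n)).map (fun k => pvBits n k ++ [true]) := by
            apply List.map_congr_left; intro k hk; exact h1 k hk
        _ = ((List.range (2 ^ n)).map (pvBits n)).map (· ++ [true]) := by
            rw [List.map_map]; rfl
        _ = (pvProd n).map (List.reverse ∘ (true :: ·)) := by
            rw [ih, List.map_map]; simp [Function.comp_def]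

theorem pvZipIdx {α β : Type} (ks : List α) (g : Nat → β) (da : α) :
    (List.range ks.length).map (fun j => (ks.getD j da, g j))
      = ks.zip ((List.range ks.length).map g) := by
  apply List.ext_getElem
  · simp
  · intro i h1 h2
    simp at h1
    simp [List.getD_eq_getElem?_getD, List.getElem?_eq_getElem h1]

theorem pvZipFst_sublist {α β : Type} (ks : List α) (bs : List β) :
    List.Sublist ((ks.zip bs).map Prod.fst) ks := by
  induction ks generalizing bs with
  | nil => simp
  | cons a t ih =>
    cases bs with
    | nil => simp
    | cons b bt => simpa using (ih bt).cons₂ a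

/-- B's dict(zip(keys, …)) has exactly the zip as its items when the keys are distinct. -/
theorem pvDictZip (ks : List String) (hnd : ks.Nodup) (bs : List Bool) :
    (PySem.Dict.ofList (ks.zip bs)).items = ks.zip bs := by
  show ((ks.zip bs).foldl (fun d p => d.insert p.1 p.2) PySem.Dict.empty).items = _
  have h := PySem.Dict.items_foldl_insert_fresh (ks.zip bs) Prod.fst Prod.snd PySem.Dict.empty
    (by intro a _; simp [pysem]) (hnd.sublist (pvZipFst_sublist ks bs))
  simpa using h

/-- A's k-th yielded dict reduces to keys zipped with the bit vector of k. -/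
theorem pvAElem (ks : List String) (hnd : ks.Nodup) (k : Nat) :
    (pvDictA ks (pvRowA ks.length (k : Int))).items = ks.zip (pvBits ks.length k) := by
  have hmapk : (PySem.List.pyRange 0 (ks.length : Int) 1).map (fun idx => PySem.List.pyGetD ks idx "") = ks := by
    have := PySem.List.map_pyGetD_pyRange_zero ks ""
    simpa [PySem.List.len] using this
  unfold pvDictA pvRowA
  rw [PySem.List.foldl_append_singleton_eq_map]
  rw [PySem.Dict.items_foldl_insert_fresh _ _ _ _
    (by intro a _; simp [pysem]) (by rw [hmapk]; exact hnd)]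
  simp only [PySem.Dict.empty, List.nil_append]
  refine Eq.trans (List.map_congr_left
    (g := fun idx => (ks.getD idx.toNat "", decide (k >>> idx.toNat % 2 = 1))) ?_) ?_
  · intro idx hidx
    rw [PySem.List.mem_pyRange_one] at hidx
    have hi' : idx = ((idx.toNat : Nat) : Int) := by omega
    have hlt : idx.toNat < ks.length := by omega
    rw [hi', PySem.List.pyGetD_natCast, PySem.List.pyGetD_map_pyRange _ _ _ _ hlt]
    congr 1
    rw [Int.toNat_natCast, Int.shiftRight_natCast]
    have hm : PySem.Int.mod ((k >>> idx.toNat : Nat):Int) 2 = (((k >>> idx.toNat) % 2 : Nat) : Int) := by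
      exact_mod_cast PySem.Int.mod_natCast (k >>> idx.toNat) 2
    rw [hm]
    have h2 : (k >>> idx.toNat) % 2 = 0 ∨ (k >>> idx.toNat) % 2 = 1 := by omega
    rcases h2 with h | h <;> simp [h]
  · rw [PySem.List.pyRange_zero_natCast, List.map_map]
    simp only [Function.comp_def, Int.toNat_natCast]
    rw [pvBits, pvZipIdx]
    rfl

-- ===== VERDICT (by name: the statement is the Claim_ definition above) =====
theorem iter_all_assignments_spec : Claim_equal_iter_all_assignments := by
  intro d _
  show iter_all_assignments d = iter_all_assignments_alt d
  unfold iter_all_assignments iter_all_assignments_alt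
  set ks := PySem.Dict.keys (PySem.Dict.ofList d) with hks
  have hnd : ks.Nodup := PySem.Dict.nodup_keys_ofList d
  simp only [List.map_map]
  rw [show ([[]] : List (List Bool)) = pvProd 0 from rfl, pvRows_foldl ks 0, Nat.zero_add]
  have hpow : ((2 : Int) ^ ks.length) = ((2 ^ ks.length : Nat) : Int) := by push_cast; ring
  rw [hpow, PySem.List.pyRange_zero_natCast (2 ^ ks.length), List.map_map]
  simp only [Function.comp_def]
  refine Eq.trans (List.map_congr_left
    (fun (k : Nat) (_ : k ∈ List.range (2 ^ ks.length)) => pvAElem ks hnd k)) ?_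
  refine Eq.trans ?_ (List.map_congr_left
    (fun t (_ : t ∈ pvProd ks.length) => (pvDictZip ks hnd t.reverse).symm))
  have h1 : (List.range (2 ^ ks.length)).map (fun k => ks.zip (pvBits ks.length k))
      = ((List.range (2 ^ ks.length)).map (pvBits ks.length)).map (fun bs => ks.zip bs) := by
    rw [List.map_map]; rfl
  rw [h1, pvBits_eq_prod, List.map_map]
  rfl
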